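/- GENERATED by tools/from_farm_form.py from prooffarm-gif/accepted/mem_read/Proof.lean (a worked proof of the farm's unit `mem_read`,
   accepted by the verdict) — do not edit. -/
import Gif.Spec.Units.mem_read
import Gif.Spec.Proved.mem_read_Lemmas

/-!
  `mem_read` (0x105c60, 44 instructions; gif_driver.c:42-58), the driver's reader, satisfies its contract, from the contracts of
  `memcpy` and `__asan_load8_noabort`. The walk is cut at the returned state of `memcpy` (Lemmas.lean, part 2):

      entry ─ mr_seg_entry ─┬─ ret4 ─ mr_seg_ret4 ─ ret
                            └─ (`count == 0`: the input is exhausted) ─ ret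
-/

open X86 X86.User Asan ProgX.Base Gif.Spec

/-- `mem_read` satisfies its contract: `c = gif->UserData`, `count = min(len, c->end − c->cur)`; `count == 0` returns 0 with nothing
but stack written; otherwise `memcpy(buf, c->cur, count)`, `c->cur += count`, and `count` is returned. -/
theorem Gif.Spec.Proved.mem_read_ok : Gif.Spec.mem_read.Statement := by
  intro Lay hLay μ hμ u₀ hcode h_memcpy h_load8 H rest frames F R n u ret he hpre
  -- `memcpy` is entered with the heap `H` itself
  have hcpy := h_memcpy (H.liveObjs ++ rest) frames
  -- 0x105c60: the three checked loads, the count, `memcpy`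
  refine (Gif.Spec.mem_read.mr_seg_entry Lay hLay μ hμ u₀ hcode h_load8 H rest frames F R n u ret hcpy he hpre).trans ?_
  intro v hv
  rcases hv with ⟨k, hmid⟩ | hret
  · -- ret4: `c->cur += count`, the epilogue
    exact Gif.Spec.mem_read.mr_seg_ret4 Lay hLay μ hμ u₀ hcode h_load8 H rest frames F R n u ret he hpre k v hmid
  · -- `count == 0`: returned already
    exact ReachVia.done hret
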